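-- pv_equiv track=rewrite | github.com/svenwelink/AdventOfCode | 2022/day01.py | runPartOne
-- ===== SOURCE A (Python) =====
-- class newBackpack:
--     def __init__(self):
--         self.items = []
--
--     def addItem(self, item):
--         self.items.append(item)
--
--     def calculateTotalCalories(self):
--         return(sum(self.items))
--
-- def runPartOne(df):
--     allElves, elveBackpack = [], newBackpack()
--
--     for i in range(len(df)):
--         possibleItem = df[i].strip()
--         if possibleItem.isnumeric():
--             elveBackpack.addItem(int(possibleItem))
--         else:
--             allElves.append(elveBackpack.calculateTotalCalories())
--             elveBackpack = newBackpack()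
--     allElves.append(elveBackpack.calculateTotalCalories())
--     return(max(allElves))
-- ===== SOURCE B (Python) =====
-- def runPartOne(df):
--     # Same result as A, but one pass with two running scalars (best, current):
--     # no backpack class, no list of all elf totals, O(1) extra space.
--     best = 0
--     current = 0
--     for line in df:
--         item = line.strip()
--         if item.isnumeric():
--             current += int(item)
--         else:
--             best = max(best, current)
--             current = 0
--     return max(best, current)
-- ===== Notes on version B (the rewrite author's own statement) =====
-- stated objective: simpler
-- what changed: Replaced the newBackpack class, the per-elf items list and the allElves totals list (with a final max over that list) by a single pass keeping two scalars, a running current-elf sum and a running best-so-far maximum; no object allocation per group and O(1) extra space.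
import Mathlib
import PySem

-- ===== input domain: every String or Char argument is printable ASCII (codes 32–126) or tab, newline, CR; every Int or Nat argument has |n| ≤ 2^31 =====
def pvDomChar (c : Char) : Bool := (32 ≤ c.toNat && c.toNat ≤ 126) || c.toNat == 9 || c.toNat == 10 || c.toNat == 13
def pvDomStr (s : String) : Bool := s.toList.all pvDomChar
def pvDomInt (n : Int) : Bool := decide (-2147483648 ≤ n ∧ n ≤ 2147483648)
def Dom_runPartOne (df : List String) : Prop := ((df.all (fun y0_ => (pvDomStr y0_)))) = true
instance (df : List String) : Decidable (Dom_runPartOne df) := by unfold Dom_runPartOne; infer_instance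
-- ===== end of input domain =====

-- B replaces A's backpack class and list of all elf totals by one pass over df keeping
-- two running scalars (best-so-far maximum and current-elf sum); same return value, O(1) extra space.
-- On the ASCII domain, Python's str.isnumeric() agrees with str.isdigit(), ported as PySem.Str.strIsdigit;
-- int(item) is PySem.Int.ofStr?, which always succeeds on a nonempty all-digit string, so '.getD 0' is an
-- unreachable totality guard in both ports, and Python's max(allElves) never sees an empty list
-- (A always appends the final backpack total), so that '.getD 0' is unreachable too.

-- ===== PORT A =====
-- A's 'for i in range(len(df)): df[i]' is a left-to-right traversal of df, ported as a foldl over df.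
-- State: (allElves totals so far, items of the current backpack).
def runPartOne (df : List String) : Int :=
  let st := df.foldl (fun (st : List Int × List Int) line =>
    let possibleItem := PySem.Str.strip line
    if PySem.Str.strIsdigit possibleItem then
      (st.1, st.2 ++ [(PySem.Int.ofStr? possibleItem).getD 0])
    else
      (st.1 ++ [st.2.sum], [])) ([], [])
  let allElves := st.1 ++ [st.2.sum]
  (PySem.List.max? allElves (fun y => y)).getD 0

-- ===== PORT B =====
-- State: (best total seen so far, current running sum).
def runPartOne_alt (df : List String) : Int :=
  let st := df.foldl (fun (st : Int × Int) line =>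
    let item := PySem.Str.strip line
    if PySem.Str.strIsdigit item then
      (st.1, st.2 + (PySem.Int.ofStr? item).getD 0)
    else
      (max st.1 st.2, 0)) ((0 : Int), (0 : Int))
  max st.1 st.2

-- ===== PRECONDITION & SPEC =====
def Spec_runPartOne (df : List String) (out : Int) : Prop := out = runPartOne_alt df
instance (df : List String) (out : Int) : Decidable (Spec_runPartOne df out) := by
  unfold Spec_runPartOne; infer_instance

-- ===== CLAIM (what is proved, stated in full; the proofs are below) =====
def Claim_equal_runPartOne : Prop := ∀ (df : List String), Dom_runPartOne df → Spec_runPartOne df (runPartOne df)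

-- ===== LEMMAS AND PROOFS =====

lemma digit_not_space {c : Char} (h : PySem.Chars.isdigit c = true) :
    PySem.Int.isIntSpace c = false := by
  simp [PySem.Chars.isdigit] at h
  simp [PySem.Int.isIntSpace]
  and_intros <;> rintro rfl <;> simp_all

lemma dropWhile_all_false {p : Char → Bool} {cs : List Char} (h : ∀ x ∈ cs, p x = false) :
    List.dropWhile p cs = cs := by
  cases cs with
  | nil => rfl
  | cons a t => simp [List.dropWhile, h a (by simp)]

-- int(s) of a nonempty all-digit string is a nonnegative integer
lemma ofChars_digits_nonneg (cs : List Char) (hd : PySem.Chars.strIsdigit cs = true)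
    {n : Int} (h : PySem.Int.ofChars? cs = some n) : 0 ≤ n := by
  simp [PySem.Chars.strIsdigit] at hd
  obtain ⟨hne, hall⟩ := hd
  have hfalse : ∀ x ∈ cs, PySem.Int.isIntSpace x = false := fun x hx => digit_not_space (hall x hx)
  have h1 : List.dropWhile PySem.Int.isIntSpace cs = cs := dropWhile_all_false hfalse
  have h2 : List.dropWhile PySem.Int.isIntSpace cs.reverse = cs.reverse :=
    dropWhile_all_false (by intro x hx; exact hfalse x (by simpa using hx))
  unfold PySem.Int.ofChars? at h
  rw [h1, h2, List.reverse_reverse] at h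
  match hcs : cs, hne, hall with
  | c :: t, _, hall =>
    have hc : PySem.Chars.isdigit c = true := hall c (by simp)
    have hcm : c ≠ '-' := by rintro rfl; simp [PySem.Chars.isdigit] at hc
    have hcp : c ≠ '+' := by rintro rfl; simp [PySem.Chars.isdigit] at hc
    dsimp only [] at h
    split at h
    · simp_all
    · simp_all
    · rw [Option.map_eq_some_iff] at h
      obtain ⟨a, ha, rfl⟩ := h
      obtain ⟨k, hk, ha⟩ := Option.bind_eq_some_iff.mp ha
      simp only [Option.pure_def, Option.some.injEq] at ha
      rw [← ha]
      exact Int.natCast_nonneg _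

lemma item_nonneg (s : String) (hd : PySem.Str.strIsdigit s = true) :
    0 ≤ (PySem.Int.ofStr? s).getD 0 := by
  cases h : PySem.Int.ofStr? s with
  | none => simp
  | some n =>
    simp only [Option.getD_some]
    exact ofChars_digits_nonneg s.toList (by simpa [PySem.Str.strIsdigit] using hd)
      (by simpa [PySem.Int.ofStr?] using h)

-- the loop invariant: B's pair is (running max of A's totals list, sum of A's current items),
-- and every total / item stays nonnegative
lemma loop_inv (ls : List String) : ∀ (acc items : List Int),
    (∀ a ∈ acc, 0 ≤ a) → (∀ a ∈ items, 0 ≤ a) →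
    (ls.foldl (fun (st : Int × Int) line =>
        if PySem.Str.strIsdigit (PySem.Str.strip line) then
          (st.1, st.2 + (PySem.Int.ofStr? (PySem.Str.strip line)).getD 0)
        else
          (max st.1 st.2, 0)) (acc.foldl max 0, items.sum))
      = ((ls.foldl (fun (st : List Int × List Int) line =>
          if PySem.Str.strIsdigit (PySem.Str.strip line) then
            (st.1, st.2 ++ [(PySem.Int.ofStr? (PySem.Str.strip line)).getD 0])
          else
            (st.1 ++ [st.2.sum], [])) (acc, items)).1.foldl max 0,
         (ls.foldl (fun (st : List Int × List Int) line =>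
          if PySem.Str.strIsdigit (PySem.Str.strip line) then
            (st.1, st.2 ++ [(PySem.Int.ofStr? (PySem.Str.strip line)).getD 0])
          else
            (st.1 ++ [st.2.sum], [])) (acc, items)).2.sum)
    ∧ (∀ a ∈ (ls.foldl (fun (st : List Int × List Int) line =>
          if PySem.Str.strIsdigit (PySem.Str.strip line) then
            (st.1, st.2 ++ [(PySem.Int.ofStr? (PySem.Str.strip line)).getD 0])
          else
            (st.1 ++ [st.2.sum], [])) (acc, items)).1, 0 ≤ a)
    ∧ (∀ a ∈ (ls.foldl (fun (st : List Int × List Int) line =>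
          if PySem.Str.strIsdigit (PySem.Str.strip line) then
            (st.1, st.2 ++ [(PySem.Int.ofStr? (PySem.Str.strip line)).getD 0])
          else
            (st.1 ++ [st.2.sum], [])) (acc, items)).2, 0 ≤ a) := by
  induction ls with
  | nil => intro acc items h1 h2; exact ⟨rfl, h1, h2⟩
  | cons line rest ih =>
    intro acc items h1 h2
    simp only [List.foldl_cons]
    by_cases hd : PySem.Str.strIsdigit (PySem.Str.strip line) = true
    · simp only [hd, if_pos]
      have := ih acc (items ++ [(PySem.Int.ofStr? (PySem.Str.strip line)).getD 0]) h1
        (by intro a ha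
            rcases List.mem_append.mp ha with h | h
            · exact h2 a h
            · simp at h; rw [h]; exact item_nonneg _ hd)
      simpa [List.sum_append] using this
    · simp only [hd, if_neg, Bool.not_eq_true] at *
      have hs : 0 ≤ items.sum := List.sum_nonneg h2
      have := ih (acc ++ [items.sum]) [] (by
          intro a ha
          rcases List.mem_append.mp ha with h | h
          · exact h1 a h
          · simp at h; rw [h]; exact hs)
        (by simp)
      simpa [List.foldl_append, hd] using this

-- max(l ++ [c]) (Python max, first extremal) equals max (running-max of l from 0) c when l is nonneg
lemma final_max (l : List Int) (c : Int) (hl : ∀ a ∈ l, 0 ≤ a) (hc : 0 ≤ c) :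
    (PySem.List.max? (l ++ [c]) (fun y => y)).getD 0 = max (l.foldl max 0) c := by
  cases l with
  | nil => simp [PySem.List.max?_id_cons, max_eq_right hc]
  | cons x t =>
    have hx : 0 ≤ x := hl x (by simp)
    rw [List.cons_append, PySem.List.max?_id_cons]
    simp [List.foldl_append, max_eq_right hx]

-- ===== VERDICT (by name: the statement is the Claim_ definition above) =====
theorem runPartOne_spec : Claim_equal_runPartOne := by
  intro df _
  obtain ⟨heq, hacc, hitems⟩ := loop_inv df [] [] (by simp) (by simp)
  simp only [List.foldl_nil, List.sum_nil] at heq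
  show (PySem.List.max? ((df.foldl (fun (st : List Int × List Int) line =>
          if PySem.Str.strIsdigit (PySem.Str.strip line) then
            (st.1, st.2 ++ [(PySem.Int.ofStr? (PySem.Str.strip line)).getD 0])
          else
            (st.1 ++ [st.2.sum], [])) ([], [])).1 ++
        [(df.foldl (fun (st : List Int × List Int) line =>
          if PySem.Str.strIsdigit (PySem.Str.strip line) then
            (st.1, st.2 ++ [(PySem.Int.ofStr? (PySem.Str.strip line)).getD 0])
          else
            (st.1 ++ [st.2.sum], [])) ([], [])).2.sum]) (fun y => y)).getD 0
      = max (df.foldl (fun (st : Int × Int) line =>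
          if PySem.Str.strIsdigit (PySem.Str.strip line) then
            (st.1, st.2 + (PySem.Int.ofStr? (PySem.Str.strip line)).getD 0)
          else
            (max st.1 st.2, 0)) ((0 : Int), (0 : Int))).1
            (df.foldl (fun (st : Int × Int) line =>
          if PySem.Str.strIsdigit (PySem.Str.strip line) then
            (st.1, st.2 + (PySem.Int.ofStr? (PySem.Str.strip line)).getD 0)
          else
            (max st.1 st.2, 0)) ((0 : Int), (0 : Int))).2
  rw [heq]
  exact final_max _ _ hacc (List.sum_nonneg hitems)
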